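-- pv_equiv track=rewrite | github.com/rauan234/Electrolyte_experiments | data_processor.py | getrplist
-- ===== SOURCE A (Python) =====
-- def decrypt(inp):
--     out = [0, 0, 0]
--
--     for ind in range(3):
--         out[ind] = 0
--         out[ind] += (ord(inp[ind * 2 + 0]) - 65) * 32
--         out[ind] += (ord(inp[ind * 2 + 1]) - 65) * 1
--
--     return out
--
-- def getrplist(inp):
--     out = []
--
--     session = [[], [], []]
--     for elm in inp:
--         try:
--             point = decrypt(elm)
--
--             session[0].append(point[0])
--             session[1].append(point[1])
--             session[2].append(point[2])
--
--
--         except Exception: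
--             if(elm == '-'):
--                 out.append(session)
--                 session = [[], [], []]
--
--     return out
-- ===== SOURCE B (Python) =====
-- def getrplist(inp):
--     # Stage 1: find the positions of all session delimiters.
--     marks = [j for j, e in enumerate(inp) if e == '-']
--     # Stage 2: for each delimited segment, keep the decodable elements
--     # (decryption succeeds exactly when the element has >= 6 characters)
--     # and build the three columns directly by comprehension.
--     out = []
--     start = 0
--     for m in marks:
--         seg = [e for e in inp[start:m] if len(e) >= 6]
--         out.append([[(ord(e[2 * i]) - 65) * 32 + (ord(e[2 * i + 1]) - 65) for e in seg] for i in range(3)])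
--         start = m + 1
--     return out
-- ===== Notes on version B (the rewrite author's own statement) =====
-- stated objective: faster
-- what changed: B replaces A's single streaming pass (try/except per element with three column accumulators flushed on '-') by a staged algorithm: first collect the indices of all '-' delimiters, then slice each delimited segment out of the input, keep the length>=6 decodable elements, and build the three columns of each session directly by comprehension.
import Mathlib
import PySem

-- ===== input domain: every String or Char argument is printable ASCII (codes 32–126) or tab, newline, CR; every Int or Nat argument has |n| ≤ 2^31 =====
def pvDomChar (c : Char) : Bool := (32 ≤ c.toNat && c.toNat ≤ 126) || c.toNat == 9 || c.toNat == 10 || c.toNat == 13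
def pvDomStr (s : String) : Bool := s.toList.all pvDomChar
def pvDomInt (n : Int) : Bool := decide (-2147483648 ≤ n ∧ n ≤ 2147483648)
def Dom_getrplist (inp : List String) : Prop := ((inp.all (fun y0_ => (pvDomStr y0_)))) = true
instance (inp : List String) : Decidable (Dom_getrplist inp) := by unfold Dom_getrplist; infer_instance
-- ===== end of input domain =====

-- B stages the work: it first finds the indices of all '-' delimiters, then slices each
-- delimited segment and decodes its columns by comprehension, instead of A's streaming
-- try/except-per-element pass with three flushed column accumulators (objective: faster by a constant factor — no exception per non-data element).


-- ===== PORT A =====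
-- A's decrypt, as called inside the try: 'none' = the IndexError the except catches
def decryptA? (s : List Char) : Option (List Int) :=
  (List.range 3).foldl (fun acc (ind : Nat) =>
    match acc with
    | none => none
    | some out =>
      match PySem.List.pyGet? s ((ind : Int) * 2 + 0), PySem.List.pyGet? s ((ind : Int) * 2 + 1) with
      | some a, some b =>
          some (out.set ind ((((a.toNat : Int) - 65) * 32) + (((b.toNat : Int) - 65) * 1)))
      | _, _ => none) (some [0, 0, 0])

-- A's loop body: state = (out, session[0], session[1], session[2])
def stepA (st : List (List (List Int)) × List Int × List Int × List Int) (elm : String) :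
    List (List (List Int)) × List Int × List Int × List Int :=
  match st with
  | (out, s0, s1, s2) =>
    match decryptA? elm.toList with
    | some point => (out, s0 ++ [point.getD 0 0], s1 ++ [point.getD 1 0], s2 ++ [point.getD 2 0])
    | none => if elm = "-" then (out ++ [[s0, s1, s2]], [], [], []) else (out, s0, s1, s2)

def getrplist (inp : List String) : List (List (List Int)) :=
  (inp.foldl stepA ([], [], [], [])).1

-- ===== PORT B =====
-- the value '(ord(e[2*i]) - 65) * 32 + (ord(e[2*i+1]) - 65)'; getD is exact here because B
-- only evaluates it under the guard len(e) >= 6 with i < 3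
def gvalB (s : List Char) (i : Nat) : Int :=
  (((s.getD (2 * i) 'A').toNat : Int) - 65) * 32 + (((s.getD (2 * i + 1) 'A').toNat : Int) - 65)

-- B's per-delimiter step: state = (out, start); slices the segment inp[start:m] and decodes it
def stepB (F : List String) (st : List (List (List Int)) × Int) (m : Int) :
    List (List (List Int)) × Int :=
  let seg := (PySem.List.slice F (some st.2) (some m)).filter (fun e => decide (6 ≤ e.toList.length))
  (st.1 ++ [(List.range 3).map (fun i => seg.map (fun e => gvalB e.toList i))], m + 1)

def getrplist_alt (inp : List String) : List (List (List Int)) :=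
  let marks : List Int :=
    (PySem.List.enumerate inp 0).filterMap (fun p => if p.2 = "-" then some p.1 else none)
  (marks.foldl (stepB inp) ([], 0)).1

-- ===== PRECONDITION & SPEC =====
def Spec_getrplist (inp : List String) (out : List (List (List Int))) : Prop := out = getrplist_alt inp
instance (inp : List String) (out : List (List (List Int))) : Decidable (Spec_getrplist inp out) := by unfold Spec_getrplist; infer_instance

-- ===== CLAIM (what is proved, stated in full; the proofs are below) =====
def Claim_equal_getrplist : Prop := ∀ (inp : List String), Dom_getrplist inp → Spec_getrplist inp (getrplist inp)

-- ===== LEMMAS AND PROOFS =====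
-- rows of decoded values for the decodable elements of a segment
def decRows (xs : List String) : List (List Int) :=
  (xs.filter (fun e => decide (6 ≤ e.toList.length))).map
    (fun e => [gvalB e.toList 0, gvalB e.toList 1, gvalB e.toList 2])

-- A's three session columns, as columns of a row list
def colsOf (rows : List (List Int)) : List Int × List Int × List Int :=
  (rows.map (fun r => r.getD 0 0), rows.map (fun r => r.getD 1 0), rows.map (fun r => r.getD 2 0))

-- the '-'-delimiter positions of a list, counted from offset c
def marksFrom (c : Nat) : List String → List Int
  | [] => []
  | x :: t => if x = "-" then (c : Int) :: marksFrom (c + 1) t else marksFrom (c + 1) t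

lemma pyGet?_long (a b c d e f : Char) (t : List Char) :
    (PySem.List.pyGet? (a::b::c::d::e::f::t) 0 = some a) ∧
    (PySem.List.pyGet? (a::b::c::d::e::f::t) 1 = some b) ∧
    (PySem.List.pyGet? (a::b::c::d::e::f::t) 2 = some c) ∧
    (PySem.List.pyGet? (a::b::c::d::e::f::t) 3 = some d) ∧
    (PySem.List.pyGet? (a::b::c::d::e::f::t) 4 = some e) ∧
    (PySem.List.pyGet? (a::b::c::d::e::f::t) 5 = some f) := by
  refine ⟨?_, ?_, ?_, ?_, ?_, ?_⟩ <;>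
    (norm_num [PySem.List.pyGet?, PySem.List.pyIdx?]; rw [if_pos (by omega)]; simp)

-- decrypt succeeds exactly on strings of length ≥ 6, with the values gvalB decodes
lemma decryptA?_eq (s : List Char) :
    decryptA? s = if 6 ≤ s.length then some [gvalB s 0, gvalB s 1, gvalB s 2] else none := by
  rcases s with _ | ⟨a, _ | ⟨b, _ | ⟨c, _ | ⟨d, _ | ⟨e, _ | ⟨f, t⟩⟩⟩⟩⟩⟩
  case cons.cons.cons.cons.cons.cons =>
    obtain ⟨e0, e1, e2, e3, e4, e5⟩ := pyGet?_long a b c d e f t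
    simp only [decryptA?, List.range_succ, List.range_zero, List.nil_append, List.cons_append,
      List.foldl_cons, List.foldl_nil, Nat.cast_ofNat, Nat.cast_zero, Nat.cast_one]
    norm_num [e0, e1, e2, e3, e4, e5, gvalB]
  all_goals norm_num [decryptA?, List.range_succ, PySem.List.pyGet?, PySem.List.pyIdx?]

-- B's enumerate/filter comprehension computes marksFrom
lemma marks_eq (l : List String) (c : Nat) :
    (PySem.List.enumerate l (c : Int)).filterMap
      (fun p => if p.2 = "-" then some p.1 else none)
    = marksFrom c l := by
  induction l generalizing c with
  | nil => simp [marksFrom, PySem.List.enumerate_nil]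
  | cons x t ih =>
    rw [PySem.List.enumerate_cons, List.filterMap_cons]
    have hc : ((c : Int) + 1) = ((c + 1 : Nat) : Int) := by push_cast; ring
    rw [hc, ih (c + 1)]
    by_cases hx : x = "-" <;> simp [marksFrom, hx]

-- a slice of ctx ++ l between start and ctx.length is a suffix of ctx
lemma slice_ctx (ctx l : List String) (start : Nat) (h : start ≤ ctx.length) :
    PySem.List.slice (ctx ++ l) (some (start : Int)) (some ((ctx.length : Nat) : Int))
      = ctx.drop start := by
  rw [PySem.List.slice_natCast, List.drop_append_of_le_length h]
  have hlen : (ctx.drop start).length = ctx.length - start := List.length_drop ..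
  rw [List.take_append_of_le_length (by omega), List.take_of_length_le (by omega)]

-- main invariant: A's streaming fold from any open session equals B's fold over the
-- remaining delimiter positions
lemma main_inv (inp : List String) : ∀ (ctx : List String) (out : List (List (List Int)))
    (start : Nat), start ≤ ctx.length →
    (inp.foldl stepA (out, colsOf (decRows (ctx.drop start)))).1
    = ((marksFrom ctx.length inp).foldl (stepB (ctx ++ inp)) (out, (start : Int))).1 := by
  induction inp with
  | nil => intro ctx out start h; simp [marksFrom]
  | cons elm rest ih =>
    intro ctx out start h
    have hassoc : ctx ++ elm :: rest = (ctx ++ [elm]) ++ rest := by simp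
    have hlen1 : (ctx ++ [elm]).length = ctx.length + 1 := by simp
    by_cases h6 : 6 ≤ elm.length
    · -- decodable element: A appends a point, B's marks are unchanged
      have hne : elm ≠ "-" := by intro he; subst he; revert h6; decide
      have hA : stepA (out, colsOf (decRows (ctx.drop start))) elm
          = (out, colsOf (decRows ((ctx ++ [elm]).drop start))) := by
        rw [List.drop_append_of_le_length h]
        simp [stepA, decryptA?_eq, h6, decRows, colsOf, List.filter_append]
      have hm : marksFrom ctx.length (elm :: rest) = marksFrom ((ctx ++ [elm]).length) rest := by
        rw [hlen1]; simp [marksFrom, hne]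
      rw [List.foldl_cons, hA, hm, hassoc]
      exact ih (ctx ++ [elm]) out start (by omega)
    · by_cases hd : elm = "-"
      · -- delimiter: A flushes the session, B processes the mark at ctx.length
        subst hd
        have hA : stepA (out, colsOf (decRows (ctx.drop start))) "-"
            = (out ++ [[(colsOf (decRows (ctx.drop start))).1,
                        (colsOf (decRows (ctx.drop start))).2.1,
                        (colsOf (decRows (ctx.drop start))).2.2]], [], [], []) := by
          simp [stepA, decryptA?_eq]
        have hB : stepB (ctx ++ "-" :: rest) (out, (start : Int)) ((ctx.length : Nat) : Int)
            = (out ++ [[(colsOf (decRows (ctx.drop start))).1,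
                        (colsOf (decRows (ctx.drop start))).2.1,
                        (colsOf (decRows (ctx.drop start))).2.2]],
               ((ctx.length : Nat) : Int) + 1) := by
          have hs : PySem.List.slice (ctx ++ "-" :: rest) (some (start : Int))
              (some ((ctx.length : Nat) : Int)) = ctx.drop start := slice_ctx ctx _ start h
          simp [stepB, hs, colsOf, decRows, List.range_succ, List.map_map]
        have hm : marksFrom ctx.length ("-" :: rest)
            = (ctx.length : Int) :: marksFrom ((ctx ++ ["-"]).length) rest := by
          rw [hlen1]; simp [marksFrom]
        rw [List.foldl_cons, hA, hm, List.foldl_cons, hB, hassoc]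
        have hcast : ((ctx.length : Nat) : Int) + 1 = (((ctx ++ ["-"]).length : Nat) : Int) := by
          rw [hlen1]; push_cast; ring
        rw [hcast]
        have := ih (ctx ++ ["-"]) (out ++ [[(colsOf (decRows (ctx.drop start))).1,
                        (colsOf (decRows (ctx.drop start))).2.1,
                        (colsOf (decRows (ctx.drop start))).2.2]]) ((ctx ++ ["-"]).length)
                  (le_refl _)
        simpa [decRows, colsOf] using this
      · -- skipped element: neither side changes
        have hA : stepA (out, colsOf (decRows (ctx.drop start))) elm
            = (out, colsOf (decRows ((ctx ++ [elm]).drop start))) := by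
          rw [List.drop_append_of_le_length h]
          simp [stepA, decryptA?_eq, h6, hd, decRows, colsOf, List.filter_append]
        have hm : marksFrom ctx.length (elm :: rest) = marksFrom ((ctx ++ [elm]).length) rest := by
          rw [hlen1]; simp [marksFrom, hd]
        rw [List.foldl_cons, hA, hm, hassoc]
        exact ih (ctx ++ [elm]) out start (by omega)

-- ===== VERDICT (by name: the statement is the Claim_ definition above) =====
theorem getrplist_spec : Claim_equal_getrplist := by
  intro inp _
  unfold Spec_getrplist getrplist getrplist_alt
  have h0 := main_inv inp [] [] 0 (by simp)
  have hm : (PySem.List.enumerate inp 0).filterMap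
      (fun p => if p.2 = "-" then some p.1 else none) = marksFrom 0 inp := by
    simpa using marks_eq inp 0
  simpa [decRows, colsOf, hm] using h0
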